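-- pv_equiv track=rewrite | github.com/mahdinatqi/Tamrin-Karga | Tamrin. 2.py | check_pass
-- ===== SOURCE A (Python) =====
-- def check_pass(info_list):
--     chars = ['@','!','$','%','^','*','&','(',')','.','_','-',',','|','/']
--     small_letters = ['a', 'b', 'c', 'd', 'e', 'f', 'g', 'h', 'i', 'j', 'k',
--                      'l', 'm', 'n', 'o', 'p', 'q', 'r', 's', 't', 'u', 'v', 'w', 'x', 'y', 'z']
--     capital_letters = ['A', 'B', 'C', 'D', 'E', 'F', 'G', 'H', 'I', 'J', 'K', 'L', 'M', 'N', 'O'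
--                        , 'P', 'Q', 'R', 'S', 'T', 'U', 'V', 'W', 'X', 'Y', 'Z']
--     for i in range(len(info_list)):
--         s = 0
--         c = 0
--         l = 0
--         L = len(info_list[i][1])
--         if L>=8:
--                     l +=1
--                     for sl in small_letters :
--                         if sl in info_list[i][1]:
--                             s +=1
--                     for cl in capital_letters:
--                         if cl in info_list[i][1]:
--                             c +=1
--         if l>0 and s>0 and c>0:
--             return info_list[i][0]
-- ===== SOURCE B (Python) =====
-- def check_pass(info_list):
--     for name, pwd in info_list:
--         if len(pwd) >= 8 and any('a' <= ch <= 'z' for ch in pwd) and any('A' <= ch <= 'Z' for ch in pwd):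
--             return name
--     return None
-- ===== Notes on version B (the rewrite author's own statement) =====
-- stated objective: simpler
-- what changed: Instead of counting, for each of the 52 alphabet letters, whether it occurs as a substring of the password, B makes a single pass over the password's own characters with ASCII range tests (and drops the unused chars list and the l/s/c counters).
import Mathlib
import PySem

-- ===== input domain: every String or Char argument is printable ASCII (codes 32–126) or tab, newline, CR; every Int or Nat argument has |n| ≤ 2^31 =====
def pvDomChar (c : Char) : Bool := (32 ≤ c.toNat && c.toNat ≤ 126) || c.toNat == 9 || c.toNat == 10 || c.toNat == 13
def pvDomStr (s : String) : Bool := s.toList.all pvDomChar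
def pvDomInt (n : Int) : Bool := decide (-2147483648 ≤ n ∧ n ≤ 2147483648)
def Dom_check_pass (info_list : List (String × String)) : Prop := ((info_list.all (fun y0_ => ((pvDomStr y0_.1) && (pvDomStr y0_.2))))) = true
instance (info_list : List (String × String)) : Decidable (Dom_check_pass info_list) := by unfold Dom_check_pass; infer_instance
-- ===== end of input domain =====

-- B scans each password's own characters once with ASCII range tests instead of
-- testing all 52 alphabet letters for substring membership; first-match/None behaviour kept.

-- ===== PORT A =====
def smallLettersA : List String := ["a", "b", "c", "d", "e", "f", "g", "h", "i", "j", "k", "l", "m", "n", "o", "p", "q", "r", "s", "t", "u", "v", "w", "x", "y", "z"]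

def capitalLettersA : List String := ["A", "B", "C", "D", "E", "F", "G", "H", "I", "J", "K", "L", "M", "N", "O", "P", "Q", "R", "S", "T", "U", "V", "W", "X", "Y", "Z"]

def check_pass : List (String × String) → Option String
  | [] => none
  | (name, pwd) :: rest =>
    let L : Int := PySem.Str.len pwd
    let lsc : Int × Int × Int :=
      if L ≥ 8 then
        (0 + 1,
         smallLettersA.foldl (fun acc sl => if PySem.Str.isIn sl pwd then acc + 1 else acc) 0,
         capitalLettersA.foldl (fun acc cl => if PySem.Str.isIn cl pwd then acc + 1 else acc) 0)
      else (0, 0, 0)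
    if lsc.1 > 0 ∧ lsc.2.1 > 0 ∧ lsc.2.2 > 0 then some name
    else check_pass rest

-- ===== PORT B =====
def check_pass_alt : List (String × String) → Option String
  | [] => none
  | (name, pwd) :: rest =>
    if 8 ≤ PySem.Str.len pwd
        && pwd.toList.any (fun ch => 'a' ≤ ch && ch ≤ 'z')
        && pwd.toList.any (fun ch => 'A' ≤ ch && ch ≤ 'Z')
    then some name
    else check_pass_alt rest

-- ===== PRECONDITION & SPEC =====
def Spec_check_pass (info_list : List (String × String)) (out : Option String) : Prop := out = check_pass_alt info_list
instance (info_list : List (String × String)) (out : Option String) : Decidable (Spec_check_pass info_list out) := by unfold Spec_check_pass; infer_instance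

-- ===== CLAIM (what is proved, stated in full; the proofs are below) =====
def Claim_equal_check_pass : Prop := ∀ (info_list : List (String × String)), Dom_check_pass info_list → Spec_check_pass info_list (check_pass info_list)

-- ===== LEMMAS AND PROOFS =====

def smallChars : List Char := ['a', 'b', 'c', 'd', 'e', 'f', 'g', 'h', 'i', 'j', 'k', 'l', 'm', 'n', 'o', 'p', 'q', 'r', 's', 't', 'u', 'v', 'w', 'x', 'y', 'z']
def capChars : List Char := ['A', 'B', 'C', 'D', 'E', 'F', 'G', 'H', 'I', 'J', 'K', 'L', 'M', 'N', 'O', 'P', 'Q', 'R', 'S', 'T', 'U', 'V', 'W', 'X', 'Y', 'Z']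

theorem char_le_iff (a b : Char) : a ≤ b ↔ a.toNat ≤ b.toNat := by
  rw [Char.le_def, UInt32.le_iff_toNat_le]; rfl

theorem char_eq_iff (a b : Char) : a = b ↔ a.toNat = b.toNat := by
  constructor
  · intro h; rw [h]
  · intro h; exact Char.ext (UInt32.toNat_inj.mp h)

theorem mem_smallChars_iff (c : Char) : c ∈ smallChars ↔ ('a' ≤ c ∧ c ≤ 'z') := by
  simp only [smallChars, List.mem_cons, List.not_mem_nil, or_false, char_le_iff, char_eq_iff,
    show ('a':Char).toNat = 97 from by decide, show ('b':Char).toNat = 98 from by decide, show ('c':Char).toNat = 99 from by decide, show ('d':Char).toNat = 100 from by decide, show ('e':Char).toNat = 101 from by decide, show ('f':Char).toNat = 102 from by decide, show ('g':Char).toNat = 103 from by decide, show ('h':Char).toNat = 104 from by decide, show ('i':Char).toNat = 105 from by decide, show ('j':Char).toNat = 106 from by decide, show ('k':Char).toNat = 107 from by decide, show ('l':Char).toNat = 108 from by decide, show ('m':Char).toNat = 109 from by decide, show ('n':Char).toNat = 110 from by decide, show ('o':Char).toNat = 111 from by decide, show ('p':Char).toNat = 112 from by decide, show ('q':Char).toNat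 = 113 from by decide, show ('r':Char).toNat = 114 from by decide, show ('s':Char).toNat = 115 from by decide, show ('t':Char).toNat = 116 from by decide, show ('u':Char).toNat = 117 from by decide, show ('v':Char).toNat = 118 from by decide, show ('w':Char).toNat = 119 from by decide, show ('x':Char).toNat = 120 from by decide, show ('y':Char).toNat = 121 from by decide, show ('z':Char).toNat = 122 from by decide]
  omega

theorem mem_capChars_iff (c : Char) : c ∈ capChars ↔ ('A' ≤ c ∧ c ≤ 'Z') := by
  simp only [capChars, List.mem_cons, List.not_mem_nil, or_false, char_le_iff, char_eq_iff,
    show ('A':Char).toNat = 65 from by decide, show ('B':Char).toNat = 66 from by decide, show ('C':Char).toNat = 67 from by decide, show ('D':Char).toNat = 68 from by decide, show ('E':Char).toNat = 69 from by decide, show ('F':Char).toNat = 70 from by decide, show ('G':Char).toNat = 71 from by decide, show ('H':Char).toNat = 72 from by decide, show ('I':Char).toNat = 73 from by decide, show ('J':Char).toNat = 74 from by decide, show ('K':Char).toNat = 75 from by decide, show ('L':Char).toNat = 76 from by decide, show ('M':Char).toNat = 77 from by decide, show ('N':Char).toNat = 78 from by decide, show ('O':Char).toNat = 79 from by decide,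 show ('P':Char).toNat = 80 from by decide, show ('Q':Char).toNat = 81 from by decide, show ('R':Char).toNat = 82 from by decide, show ('S':Char).toNat = 83 from by decide, show ('T':Char).toNat = 84 from by decide, show ('U':Char).toNat = 85 from by decide, show ('V':Char).toNat = 86 from by decide, show ('W':Char).toNat = 87 from by decide, show ('X':Char).toNat = 88 from by decide, show ('Y':Char).toNat = 89 from by decide, show ('Z':Char).toNat = 90 from by decide]
  omega

theorem singleton_infix_iff {α : Type} {a : α} {l : List α} : [a] <:+: l ↔ a ∈ l := by
  constructor
  · intro h; exact (List.singleton_sublist).1 h.sublist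
  · intro h
    obtain ⟨s, t, rfl⟩ := List.append_of_mem h
    exact ⟨s, t, by simp⟩

theorem exists_letter_iff (chars : List Char) (pwd : String) :
    (∃ sl ∈ chars.map (fun c => String.ofList [c]), PySem.Str.isIn sl pwd = true)
      ↔ ∃ c ∈ pwd.toList, c ∈ chars := by
  constructor
  · rintro ⟨sl, hmem, hin⟩
    rw [List.mem_map] at hmem
    obtain ⟨c, hc, rfl⟩ := hmem
    rw [PySem.Str.isIn_iff_infix] at hin
    simp only [String.toList_ofList] at hin
    exact ⟨c, singleton_infix_iff.1 hin, hc⟩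
  · rintro ⟨c, hcp, hc⟩
    refine ⟨String.ofList [c], List.mem_map.2 ⟨c, hc, rfl⟩, ?_⟩
    rw [PySem.Str.isIn_iff_infix]
    simp only [String.toList_ofList]
    exact singleton_infix_iff.2 hcp

theorem count_small_pos_iff (pwd : String) :
    (0 < smallLettersA.foldl (fun acc sl => if PySem.Str.isIn sl pwd then acc + 1 else acc) (0 : Int))
      ↔ pwd.toList.any (fun ch => 'a' ≤ ch && ch ≤ 'z') = true := by
  rw [PySem.List.foldl_if_add_one]
  rw [show smallLettersA = smallChars.map (fun c => String.ofList [c]) from by decide]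
  constructor
  · intro h
    have hpos : 0 < (smallChars.map (fun c => String.ofList [c])).countP (fun sl => PySem.Str.isIn sl pwd) := by
      by_contra hn
      omega
    obtain ⟨sl, hmem, hin⟩ := List.countP_pos_iff.1 hpos
    have hx : ∃ sl ∈ smallChars.map (fun c => String.ofList [c]), PySem.Str.isIn sl pwd = true := Exists.intro sl (And.intro hmem hin)
    obtain ⟨c, hcp, hc⟩ := (exists_letter_iff smallChars pwd).1 hx
    rw [List.any_eq_true]
    exact ⟨c, hcp, by simp [Bool.and_eq_true, decide_eq_true_eq]; exact (mem_smallChars_iff c).1 hc⟩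
  · intro h
    rw [List.any_eq_true] at h
    obtain ⟨c, hcp, hc⟩ := h
    simp only [Bool.and_eq_true, decide_eq_true_eq] at hc
    have := (exists_letter_iff smallChars pwd).2 ⟨c, hcp, (mem_smallChars_iff c).2 hc⟩
    obtain ⟨sl, hmem, hin⟩ := this
    have hpos : 0 < (smallChars.map (fun c => String.ofList [c])).countP (fun sl => PySem.Str.isIn sl pwd) :=
      List.countP_pos_iff.2 ⟨sl, hmem, hin⟩
    omega

theorem count_cap_pos_iff (pwd : String) :
    (0 < capitalLettersA.foldl (fun acc cl => if PySem.Str.isIn cl pwd then acc + 1 else acc) (0 : Int))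
      ↔ pwd.toList.any (fun ch => 'A' ≤ ch && ch ≤ 'Z') = true := by
  rw [PySem.List.foldl_if_add_one]
  rw [show capitalLettersA = capChars.map (fun c => String.ofList [c]) from by decide]
  constructor
  · intro h
    have hpos : 0 < (capChars.map (fun c => String.ofList [c])).countP (fun sl => PySem.Str.isIn sl pwd) := by
      by_contra hn
      omega
    obtain ⟨sl, hmem, hin⟩ := List.countP_pos_iff.1 hpos
    have hx : ∃ sl ∈ capChars.map (fun c => String.ofList [c]), PySem.Str.isIn sl pwd = true := Exists.intro sl (And.intro hmem hin)
    obtain ⟨c, hcp, hc⟩ := (exists_letter_iff capChars pwd).1 hx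
    rw [List.any_eq_true]
    exact ⟨c, hcp, by simp [Bool.and_eq_true, decide_eq_true_eq]; exact (mem_capChars_iff c).1 hc⟩
  · intro h
    rw [List.any_eq_true] at h
    obtain ⟨c, hcp, hc⟩ := h
    simp only [Bool.and_eq_true, decide_eq_true_eq] at hc
    have := (exists_letter_iff capChars pwd).2 ⟨c, hcp, (mem_capChars_iff c).2 hc⟩
    obtain ⟨sl, hmem, hin⟩ := this
    have hpos : 0 < (capChars.map (fun c => String.ofList [c])).countP (fun sl => PySem.Str.isIn sl pwd) :=
      List.countP_pos_iff.2 ⟨sl, hmem, hin⟩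
    omega

theorem cond_iff (pwd : String) :
    (let L : Int := PySem.Str.len pwd
     let lsc : Int × Int × Int :=
       if L ≥ 8 then
         (0 + 1,
          smallLettersA.foldl (fun acc sl => if PySem.Str.isIn sl pwd then acc + 1 else acc) 0,
          capitalLettersA.foldl (fun acc cl => if PySem.Str.isIn cl pwd then acc + 1 else acc) 0)
       else (0, 0, 0)
     lsc.1 > 0 ∧ lsc.2.1 > 0 ∧ lsc.2.2 > 0)
      ↔ (8 ≤ PySem.Str.len pwd
          && pwd.toList.any (fun ch => 'a' ≤ ch && ch ≤ 'z')
          && pwd.toList.any (fun ch => 'A' ≤ ch && ch ≤ 'Z')) = true := by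
  dsimp only
  by_cases h8 : PySem.Str.len pwd ≥ 8
  · rw [if_pos h8]
    simp only [Bool.and_eq_true, decide_eq_true_eq]
    constructor
    · rintro ⟨-, hs, hc⟩
      exact ⟨⟨h8, (count_small_pos_iff pwd).1 hs⟩, (count_cap_pos_iff pwd).1 hc⟩
    · rintro ⟨⟨-, hs⟩, hc⟩
      exact ⟨by omega, (count_small_pos_iff pwd).2 hs, (count_cap_pos_iff pwd).2 hc⟩
  · rw [if_neg h8]
    simp only [Bool.and_eq_true, decide_eq_true_eq]
    constructor
    · rintro ⟨h, -, -⟩; omega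
    · rintro ⟨⟨h, -⟩, -⟩; exact absurd h h8

theorem check_pass_eq (l : List (String × String)) : check_pass l = check_pass_alt l := by
  induction l with
  | nil => rfl
  | cons hd tl ih =>
    obtain ⟨name, pwd⟩ := hd
    rw [check_pass, check_pass_alt]
    by_cases h : (8 ≤ PySem.Str.len pwd
          && pwd.toList.any (fun ch => 'a' ≤ ch && ch ≤ 'z')
          && pwd.toList.any (fun ch => 'A' ≤ ch && ch ≤ 'Z')) = true
    · rw [if_pos ((cond_iff pwd).2 h), if_pos h]
    · rw [if_neg (fun hc => h ((cond_iff pwd).1 hc)), if_neg h]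
      exact ih

-- ===== VERDICT (by name: the statement is the Claim_ definition above) =====
theorem check_pass_spec : Claim_equal_check_pass := by
  intro info_list _
  unfold Spec_check_pass
  exact check_pass_eq info_list
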